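-- pv_equiv track=rewrite | github.com/tushar-coin/Agentic-resume-generator | utils/latex_renderer.py | format_project_bullets
-- ===== SOURCE A (Python) =====
-- def escape_latex(text: str) -> str:
--     """Escape special LaTeX characters in text.
--
--     IMPORTANT: Process backslash FIRST to avoid double-escaping.
--     E.g., if we escape # first to \#, then \\ to \textbackslash{},
--     we'd end up with \textbackslash{}# instead of \#.
--     """
--     text = str(text)
--
--     # MUST do backslash first, before any other character that uses backslash
--     text = text.replace("\\", r"\textbackslash{}")
--
--     # Now safe to escape other characters
--     replacements = {
--         "&": r"\&",
--         "%": r"\%",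
--         "$": r"\$",
--         "#": r"\#",
--         "_": r"\_",
--         "{": r"\{",
--         "}": r"\}",
--         "~": r"\textasciitilde{}",
--         "^": r"\^{}",
--     }
--
--     for char, escaped in replacements.items():
--         text = text.replace(char, escaped)
--
--     return text
--
-- def format_project_bullets(bullets: list[str]) -> str:
--     """
--     Format project bullets as LaTeX itemize.
--
--     Example output:
--     \\resumeItemListStart
--     \\resumeItem{bullet 1}
--     \\resumeItem{bullet 2}
--     \\resumeItemListEnd
--     """
--     if not bullets:
--         return ""
--
--     items = "\n".join(
--         f"\\resumeItem{{{escape_latex(bullet)}}}"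
--         for bullet in bullets
--     )
--
--     return f"\\resumeItemListStart\n{items}\n\\resumeItemListEnd"
-- ===== SOURCE B (Python) =====
-- # One-pass escape: a single str.translate over a prebuilt table replaces A's ten
-- # sequential .replace scans; the block is joined as one list of lines.
-- _TABLE = str.maketrans({
--     "\\": r"\textbackslash\{\}",
--     "&": r"\&",
--     "%": r"\%",
--     "$": r"\$",
--     "#": r"\#",
--     "_": r"\_",
--     "{": r"\{",
--     "}": r"\}",
--     "~": r"\textasciitilde{}",
--     "^": r"\^{}",
-- })
--
-- def format_project_bullets(bullets: list[str]) -> str: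
--     if not bullets:
--         return ""
--     lines = ["\\resumeItemListStart"]
--     lines += ["\\resumeItem{%s}" % str(b).translate(_TABLE) for b in bullets]
--     lines.append("\\resumeItemListEnd")
--     return "\n".join(lines)
-- ===== Notes on version B (the rewrite author's own statement) =====
-- stated objective: faster
-- what changed: escape_latex's backslash pre-pass plus nine sequential str.replace scans become one str.translate pass over a prebuilt table (the backslash entry carries its braces already escaped), and the itemize block is built as a single list of lines joined once.
import Mathlib
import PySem

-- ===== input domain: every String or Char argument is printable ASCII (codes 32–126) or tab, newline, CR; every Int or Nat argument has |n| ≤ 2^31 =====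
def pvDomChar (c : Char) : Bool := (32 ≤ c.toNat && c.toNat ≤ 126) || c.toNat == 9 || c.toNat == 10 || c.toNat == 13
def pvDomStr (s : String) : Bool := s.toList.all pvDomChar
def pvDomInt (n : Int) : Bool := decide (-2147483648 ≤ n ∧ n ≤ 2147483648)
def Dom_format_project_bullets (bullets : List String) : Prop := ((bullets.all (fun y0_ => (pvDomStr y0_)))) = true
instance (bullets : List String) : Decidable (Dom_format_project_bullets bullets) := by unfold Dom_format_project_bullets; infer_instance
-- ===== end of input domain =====

-- B replaces A's backslash pre-pass plus nine sequential replace scans by a single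
-- one-pass per-character translation table, and joins the block as one list of lines (idiomatic).

-- ===== PORT A =====
def pvReplacements : List (String × String) :=
  [("&", "\\&"), ("%", "\\%"), ("$", "\\$"), ("#", "\\#"), ("_", "\\_"),
   ("{", "\\{"), ("}", "\\}"), ("~", "\\textasciitilde{}"), ("^", "\\^{}")]

def escape_latex (text : String) : String :=
  let text := PySem.Str.replace text "\\" "\\textbackslash{}"
  pvReplacements.foldl (fun t pr => PySem.Str.replace t pr.1 pr.2) text

def format_project_bullets (bullets : List String) : String :=
  if bullets = [] then ""
  else
    let items := PySem.Str.join "\n"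
      (bullets.map (fun b => "\\resumeItem{" ++ escape_latex b ++ "}"))
    "\\resumeItemListStart\n" ++ items ++ "\n\\resumeItemListEnd"

-- ===== PORT B =====
-- the translate table of Source B (str.translate is one pass: each char maps through the table)
def pvTable (c : Char) : List Char :=
  if c = '\\' then "\\textbackslash\\{\\}".toList
  else if c = '&' then "\\&".toList
  else if c = '%' then "\\%".toList
  else if c = '$' then "\\$".toList
  else if c = '#' then "\\#".toList
  else if c = '_' then "\\_".toList
  else if c = '{' then "\\{".toList
  else if c = '}' then "\\}".toList
  else if c = '~' then "\\textasciitilde{}".toList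
  else if c = '^' then "\\^{}".toList
  else [c]

def pvTranslate (s : String) : String := String.ofList (s.toList.flatMap pvTable)

def format_project_bullets_alt (bullets : List String) : String :=
  if bullets = [] then ""
  else
    let lines := "\\resumeItemListStart"
      :: bullets.map (fun b => "\\resumeItem{" ++ pvTranslate b ++ "}")
      ++ ["\\resumeItemListEnd"]
    PySem.Str.join "\n" lines

-- ===== PRECONDITION & SPEC =====
def Spec_format_project_bullets (bullets : List String) (out : String) : Prop := out = format_project_bullets_alt bullets
instance (bullets : List String) (out : String) : Decidable (Spec_format_project_bullets bullets out) := by unfold Spec_format_project_bullets; infer_instance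

-- ===== CLAIM (what is proved, stated in full; the proofs are below) =====
def Claim_equal_format_project_bullets : Prop := ∀ (bullets : List String), Dom_format_project_bullets bullets → Spec_format_project_bullets bullets (format_project_bullets bullets)

-- ===== LEMMAS AND PROOFS =====

-- replace with a single-character pattern is a per-character expansion
theorem go_single (c : Char) (r : List Char) :
    ∀ (s : List Char) (fuel : Nat) (acc : List Char), s.length ≤ fuel →
      PySem.Chars.replace.go [c] r fuel s acc
        = acc.reverse ++ s.flatMap (fun x => if x = c then r else [x]) := by
  intro s
  induction s with
  | nil =>
    intro fuel acc _
    cases fuel <;> simp [PySem.Chars.replace.go]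
  | cons x t ih =>
    intro fuel acc hlen
    cases fuel with
    | zero => simp at hlen
    | succ f =>
      have hlen' : t.length ≤ f := by simp at hlen; omega
      rw [PySem.Chars.replace.go]
      by_cases hx : x = c
      · subst hx
        have hp : [x].isPrefixOf (x :: t) = true := by simp [List.isPrefixOf]
        rw [hp]
        simp only [if_true]
        simp only [List.length_singleton, List.drop_succ_cons, List.drop_zero]
        rw [ih f (r.reverse ++ acc) hlen']
        simp
      · have hp : [c].isPrefixOf (x :: t) = false := by
          simp [List.isPrefixOf]
          exact fun h => absurd h.symm hx
        rw [hp]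
        simp only [Bool.false_eq_true, if_false]
        rw [ih f (x :: acc) hlen']
        simp [hx]

theorem replace_single (s : List Char) (c : Char) (r : List Char) :
    PySem.Chars.replace s [c] r = s.flatMap (fun x => if x = c then r else [x]) := by
  rw [PySem.Chars.replace]
  simp [go_single c r s s.length [] (le_refl _)]

-- A's ten sequential replaces compute exactly B's one-pass table expansion
theorem escape_toList (s : String) :
    (escape_latex s).toList = s.toList.flatMap pvTable := by
  simp only [escape_latex, pvReplacements, List.foldl_cons, List.foldl_nil,
    PySem.Str.toList_replace]
  simp only [show ("\\" : String).toList = ['\\'] from rfl,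
    show ("&" : String).toList = ['&'] from rfl,
    show ("%" : String).toList = ['%'] from rfl,
    show ("$" : String).toList = ['$'] from rfl,
    show ("#" : String).toList = ['#'] from rfl,
    show ("_" : String).toList = ['_'] from rfl,
    show ("{" : String).toList = ['{'] from rfl,
    show ("}" : String).toList = ['}'] from rfl,
    show ("~" : String).toList = ['~'] from rfl,
    show ("^" : String).toList = ['^'] from rfl]
  simp only [replace_single, List.flatMap_assoc]
  apply List.flatMap_congr
  intro x _
  by_cases h0 : x = '\\'; · subst h0; decide
  by_cases h1 : x = '&'; · subst h1; decide
  by_cases h2 : x = '%'; · subst h2; decide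
  by_cases h3 : x = '$'; · subst h3; decide
  by_cases h4 : x = '#'; · subst h4; decide
  by_cases h5 : x = '_'; · subst h5; decide
  by_cases h6 : x = '{'; · subst h6; decide
  by_cases h7 : x = '}'; · subst h7; decide
  by_cases h8 : x = '~'; · subst h8; decide
  by_cases h9 : x = '^'; · subst h9; decide
  simp [pvTable, h0, h1, h2, h3, h4, h5, h6, h7, h8, h9]

theorem join_cons_ne (sep a : List Char) (l : List (List Char)) (h : l ≠ []) :
    PySem.Chars.join sep (a :: l) = a ++ sep ++ PySem.Chars.join sep l := by
  cases l with
  | nil => exact absurd rfl h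
  | cons b t => rw [PySem.Chars.join_cons_cons]

theorem join_append_singleton (sep z : List Char) (ys : List (List Char)) (h : ys ≠ []) :
    PySem.Chars.join sep (ys ++ [z]) = PySem.Chars.join sep ys ++ sep ++ z := by
  induction ys with
  | nil => exact absurd rfl h
  | cons a t ih =>
    cases t with
    | nil => simp [PySem.Chars.join_cons_cons, PySem.Chars.join_singleton]
    | cons b u =>
      have hsh : (a :: b :: u) ++ [z] = a :: ((b :: u) ++ [z]) := by simp
      rw [hsh, join_cons_ne sep a ((b :: u) ++ [z]) (by simp), ih (by simp),
        PySem.Chars.join_cons_cons]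
      simp [List.append_assoc]

theorem main_eq (bullets : List String) :
    format_project_bullets bullets = format_project_bullets_alt bullets := by
  by_cases hb : bullets = []
  · subst hb; rfl
  · rw [format_project_bullets, format_project_bullets_alt, if_neg hb, if_neg hb]
    apply String.toList_inj.mp
    simp only [String.toList_append, PySem.Str.toList_join, List.map_map, List.map_cons,
      List.map_append]
    have hmap : ∀ b : String,
        (String.toList ∘ fun b => "\\resumeItem{" ++ escape_latex b ++ "}") b
          = (String.toList ∘ fun b => "\\resumeItem{" ++ pvTranslate b ++ "}") b := by
      intro b
      simp [pvTranslate, String.toList_append, escape_toList, String.toList_ofList]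
    rw [funext hmap]
    set ys := bullets.map (String.toList ∘ fun b => "\\resumeItem{" ++ pvTranslate b ++ "}") with hys
    have hne : ys ≠ [] := by simp [hys, hb]
    simp only [List.map_nil]
    rw [List.cons_append, join_cons_ne "\n".toList "\\resumeItemListStart".toList
        (ys ++ ["\\resumeItemListEnd".toList]) (by simp),
      join_append_singleton "\n".toList "\\resumeItemListEnd".toList ys hne]
    have h1 : ("\\resumeItemListStart\n" : String).toList
        = "\\resumeItemListStart".toList ++ "\n".toList := rfl
    have h2 : ("\n\\resumeItemListEnd" : String).toList
        = "\n".toList ++ "\\resumeItemListEnd".toList := rfl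
    rw [h1, h2]
    simp [List.append_assoc]

-- ===== VERDICT (by name: the statement is the Claim_ definition above) =====
theorem format_project_bullets_spec : Claim_equal_format_project_bullets := by
  intro bullets _
  unfold Spec_format_project_bullets
  exact main_eq bullets
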